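-- pv_equiv track=rewrite | github.com/NarminaKhurschova/CW_bank_operations | utils/sort_operations.py | div_card_numer
-- ===== SOURCE A (Python) =====
-- def div_card_numer(operation_to_div_card):
--     """
--     Функция приведения номера счета или карты
--     в отображение по 4 цифры
--     :param operation_to_div_card: цифровая часть названия карты или счета,
--     :return: цифровая часть карты или счета, поделенная по 4 цифры
--     """
--     card_to_div = operation_to_div_card
--     card_number_formatted = []
--     for i, sym in enumerate(card_to_div):
--         card_number_formatted.append(sym)
--         if (i + 1) % 4 == 0:
--             card_number_formatted.append(' ')
--     return card_number_formatted
-- ===== SOURCE B (Python) =====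
-- def div_card_numer(operation_to_div_card):
--     """Chunk the string in strides of 4, appending a space after each full 4-chunk."""
--     out = []
--     rest = operation_to_div_card
--     while rest:
--         chunk, rest = rest[:4], rest[4:]
--         out.extend(chunk)
--         if len(chunk) == 4:
--             out.append(' ')
--     return out
-- ===== Notes on version B (the rewrite author's own statement) =====
-- stated objective: simpler
-- what changed: Replaces A's per-character enumerate loop with a modulo-4 counter by a while loop that slices 4-character chunks off the front, extends with the chunk and appends a space only for full chunks.
import Mathlib
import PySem

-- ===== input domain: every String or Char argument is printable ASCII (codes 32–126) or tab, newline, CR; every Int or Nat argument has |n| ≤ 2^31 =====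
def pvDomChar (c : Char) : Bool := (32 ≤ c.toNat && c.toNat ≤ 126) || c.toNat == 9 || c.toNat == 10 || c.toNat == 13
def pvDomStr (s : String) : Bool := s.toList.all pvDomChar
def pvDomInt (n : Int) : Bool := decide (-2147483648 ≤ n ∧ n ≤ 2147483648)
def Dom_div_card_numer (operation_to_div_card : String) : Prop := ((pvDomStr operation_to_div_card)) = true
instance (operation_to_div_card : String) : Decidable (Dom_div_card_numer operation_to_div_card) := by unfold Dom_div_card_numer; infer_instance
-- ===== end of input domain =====

-- B replaces A's per-character loop with a modulo counter by a while loop that strips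
-- 4-character chunks off the front with slicing (objective: simpler decomposition).

-- ===== PORT A =====
-- literal port of A: enumerate the characters, append each, append ' ' when (i+1) % 4 == 0
def div_card_numer (operation_to_div_card : String) : List String :=
  let card_to_div := operation_to_div_card
  (PySem.List.enumerate card_to_div.toList).foldl
    (fun card_number_formatted p =>
      let card_number_formatted := card_number_formatted ++ [String.mk [p.2]]
      if PySem.Int.mod (p.1 + 1) 4 == 0 then card_number_formatted ++ [" "]
      else card_number_formatted) []

-- ===== PORT B =====
-- used by divCardLoop's termination proof: rest[4:] is drop 4
theorem pvSliceFrom4 {α : Type} (l : List α) :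
    PySem.List.slice l (some 4) none = l.drop 4 := by
  have h := PySem.List.slice_from_natCast l 4
  simpa using h

-- the while loop of Source B: strip rest[:4], extend, append ' ' on a full chunk
def divCardLoop (rest : List Char) (out : List String) : List String :=
  if h : rest = [] then out
  else
    let chunk := PySem.List.slice rest none (some 4)
    let rest' := PySem.List.slice rest (some 4) none
    let out := out ++ chunk.map (fun c => String.mk [c])
    let out := if chunk.length == 4 then out ++ [" "] else out
    divCardLoop rest' out
termination_by rest.length
decreasing_by
  simp only [pvSliceFrom4, List.length_drop]
  cases rest with
  | nil => exact absurd rfl h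
  | cons a t => simp only [List.length_cons]; omega

def div_card_numer_alt (operation_to_div_card : String) : List String :=
  divCardLoop operation_to_div_card.toList []

-- ===== PRECONDITION & SPEC =====
def Spec_div_card_numer (operation_to_div_card : String) (out : List String) : Prop := out = div_card_numer_alt operation_to_div_card
instance (operation_to_div_card : String) (out : List String) : Decidable (Spec_div_card_numer operation_to_div_card out) := by unfold Spec_div_card_numer; infer_instance

-- ===== CLAIM (what is proved, stated in full; the proofs are below) =====
def Claim_equal_div_card_numer : Prop := ∀ (operation_to_div_card : String), Dom_div_card_numer operation_to_div_card → Spec_div_card_numer operation_to_div_card (div_card_numer operation_to_div_card)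

-- ===== LEMMAS AND PROOFS =====

theorem pvSliceTo4 {α : Type} (l : List α) :
    PySem.List.slice l none (some 4) = l.take 4 := by
  have h := PySem.List.slice_to_natCast l 4
  simpa using h

theorem pvLoopNil (out : List String) : divCardLoop [] out = out := by
  rw [divCardLoop]; simp

theorem pvLoopStep (l : List Char) (out : List String) (h : ¬ l = []) :
    divCardLoop l out = divCardLoop (l.drop 4)
      (if (l.take 4).length == 4 then
        out ++ (l.take 4).map (fun c => String.mk [c]) ++ [" "]
      else out ++ (l.take 4).map (fun c => String.mk [c])) := by
  rw [divCardLoop]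
  simp [pvSliceTo4, pvSliceFrom4, h]

-- A's fold over enumerate l s equals B's chunking loop, whenever the
-- starting index s is a nonnegative multiple of 4.
theorem pvLoopEq : ∀ (n : Nat) (l : List Char) (s : Int) (acc : List String),
    l.length ≤ n → 0 ≤ s → PySem.Int.mod s 4 = 0 →
    (PySem.List.enumerate l s).foldl
      (fun card_number_formatted p =>
        if PySem.Int.mod (p.1 + 1) 4 == 0 then
          card_number_formatted ++ [String.mk [p.2]] ++ [" "]
        else card_number_formatted ++ [String.mk [p.2]]) acc
    = divCardLoop l acc := by
  intro n
  induction n with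
  | zero =>
    intro l s acc hn _ _
    have : l = [] := List.eq_nil_of_length_eq_zero (Nat.le_zero.mp hn)
    subst this
    simp [PySem.List.enumerate, pvLoopNil]
  | succ n ih =>
    intro l s acc hn hs hmod
    have hm' : s % 4 = 0 := by
      simpa [PySem.Int.mod, Int.fmod_eq_emod] using hmod
    have hnd1 : ¬ (4:Int) ∣ (s + 1) := by omega
    have hnd2 : ¬ (4:Int) ∣ (s + 1 + 1) := by omega
    have hnd3 : ¬ (4:Int) ∣ (s + 1 + 1 + 1) := by omega
    have hd4 : (4:Int) ∣ (s + 1 + 1 + 1 + 1) := by omega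
    match l with
    | [] => simp [PySem.List.enumerate, pvLoopNil]
    | [a] =>
      rw [pvLoopStep _ _ (by simp)]
      simp [PySem.List.enumerate, pvLoopNil, hnd1]
    | [a, b] =>
      rw [pvLoopStep _ _ (by simp)]
      simp [PySem.List.enumerate, pvLoopNil, hnd1, hnd2]
    | [a, b, c] =>
      rw [pvLoopStep _ _ (by simp)]
      simp [PySem.List.enumerate, pvLoopNil, hnd1, hnd2, hnd3]
    | a :: b :: c :: d :: rest =>
      have hrest : rest.length ≤ n := by
        simp only [List.length_cons] at hn; omega
      have key := fun acc' => ih rest (s + 1 + 1 + 1 + 1) acc' hrest (by omega)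
        (by simp [PySem.Int.mod, Int.fmod_eq_emod]; omega)
      rw [pvLoopStep _ _ (by simp)]
      simp only [PySem.List.enumerate_cons, List.foldl_cons]
      rw [key]
      congr 1
      simp [hnd1, hnd2, hnd3, hd4, List.append_assoc]

-- ===== VERDICT (by name: the statement is the Claim_ definition above) =====
theorem div_card_numer_spec : Claim_equal_div_card_numer := by
  intro s _
  unfold Spec_div_card_numer div_card_numer div_card_numer_alt
  exact pvLoopEq s.toList.length s.toList 0 [] le_rfl (by decide) (by decide)
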